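-- pv_equiv track=rewrite | github.com/lllcho/CAPTCHA-breaking | util.py | words_simmilar_score
-- ===== SOURCE A (Python) =====
-- def word_simialr_score(s1, s2):
--     score = 0
--     for j in range(min(len(s1), len(s2))):
--         if s1[j] == s2[j]:
--             score += 1
--     return score
--
-- def words_simmilar_score(word, words):
--     word_score = {}
--     for Word in words:
--         ws = word_simialr_score(word, Word)
--         if ws not in word_score.keys():
--             word_score[ws] = [Word]
--         else:
--             word_score[ws].append(Word)
--     return word_score
-- ===== SOURCE B (Python) =====
-- def words_simmilar_score(word, words):
--     pairs = [(sum(a == c for a, c in zip(word, w)), w) for w in words]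
--     result = {}
--     for s in dict.fromkeys(s for s, _ in pairs):
--         result[s] = [w for t, w in pairs if t == s]
--     return result
-- ===== Notes on version B (the rewrite author's own statement) =====
-- stated objective: alternative
-- what changed: Replaces A's incremental dict accumulation (insert-or-append per word) by a two-phase pass: score every word once into (score, word) pairs, dedup the scores in first-occurrence order, then build each group with one filter per distinct score.
import Mathlib
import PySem

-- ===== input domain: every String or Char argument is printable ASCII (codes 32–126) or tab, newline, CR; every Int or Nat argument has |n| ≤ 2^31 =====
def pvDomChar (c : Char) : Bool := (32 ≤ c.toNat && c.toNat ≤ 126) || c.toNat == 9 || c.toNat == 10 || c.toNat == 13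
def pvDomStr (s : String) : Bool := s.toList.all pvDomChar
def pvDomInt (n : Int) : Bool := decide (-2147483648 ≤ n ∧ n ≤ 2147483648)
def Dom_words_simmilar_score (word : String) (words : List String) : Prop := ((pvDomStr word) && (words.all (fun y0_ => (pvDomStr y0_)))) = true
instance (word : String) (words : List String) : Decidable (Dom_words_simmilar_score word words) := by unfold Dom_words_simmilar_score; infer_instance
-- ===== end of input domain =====

-- B replaces A's incremental dict accumulation by a two-phase pass: score every word once,
-- dedup the scores in first-occurrence order, then build each group by one filter per distinct
-- score (objective: alternative — a different grouping algorithm of similar cost).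

-- ===== PORT A =====
-- s1[j] / s2[j] are always in range (j < min of the lengths), so comparing the pyGet? options
-- is exact: both are `some` there.
def word_simialr_score (s1 s2 : String) : Int :=
  (PySem.List.pyRange 0 (min (PySem.Str.len s1) (PySem.Str.len s2))).foldl
    (fun score j =>
      if PySem.Str.pyGet? s1 j == PySem.Str.pyGet? s2 j then score + 1 else score) 0

def words_simmilar_score (word : String) (words : List String) : List (Int × List String) :=
  (words.foldl (fun word_score Word =>
      let ws := word_simialr_score word Word
      if !(word_score.contains ws) then word_score.insert ws [Word]
      else word_score.modify ws [] (fun l => l ++ [Word]))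
    (PySem.Dict.empty : PySem.Dict Int (List String))).items

-- ===== PORT B =====
def sim_alt (word w : String) : Int :=
  ((word.toList.zip w.toList).map (fun p => if p.1 == p.2 then (1 : Int) else 0)).sum

def words_simmilar_score_alt (word : String) (words : List String) : List (Int × List String) :=
  let pairs := words.map (fun w => (sim_alt word w, w))
  ((PySem.List.dedup (pairs.map (fun p => p.1))).foldl
      (fun result s =>
        result.insert s ((pairs.filter (fun p => p.1 == s)).map (fun p => p.2)))
      (PySem.Dict.empty : PySem.Dict Int (List String))).items

-- ===== PRECONDITION & SPEC =====
def Spec_words_simmilar_score (word : String) (words : List String) (out : List (Int × List String)) : Prop := out = words_simmilar_score_alt word words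
instance (word : String) (words : List String) (out : List (Int × List String)) : Decidable (Spec_words_simmilar_score word words out) := by unfold Spec_words_simmilar_score; infer_instance

-- ===== CLAIM (what is proved, stated in full; the proofs are below) =====
def Claim_equal_words_simmilar_score : Prop := ∀ (word : String) (words : List String), Dom_words_simmilar_score word words → Spec_words_simmilar_score word words (words_simmilar_score word words)

-- ===== LEMMAS AND PROOFS =====

-- the two similarity helpers agree (index loop over the common prefix = 0/1-sum over the zip)
theorem countP_range_min (l1 l2 : List Char) :
    (List.range (min l1.length l2.length)).countP (fun j => l1[j]? == l2[j]?)
      = (l1.zip l2).countP (fun p => p.1 == p.2) := by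
  induction l1 generalizing l2 with
  | nil => simp
  | cons a t1 ih =>
    cases l2 with
    | nil => simp
    | cons b t2 =>
      have hmin : min (a :: t1).length (b :: t2).length = min t1.length t2.length + 1 := by
        simp [Nat.succ_min_succ]
      rw [hmin, List.range_succ_eq_map, List.countP_cons, List.countP_map]
      simp only [Function.comp_def, List.getElem?_cons_succ, List.getElem?_cons_zero,
        List.zip_cons_cons, List.countP_cons, Option.some_beq_some]
      rw [ih t2]
      rfl

theorem sim_eq (s1 s2 : String) : word_simialr_score s1 s2 = sim_alt s1 s2 := by
  unfold word_simialr_score sim_alt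
  rw [PySem.Str.len_eq, PySem.Str.len_eq, ← Nat.cast_min, PySem.List.pyRange_zero_natCast,
    List.foldl_map, PySem.List.sum_map_ite_one_zero]
  simp only [PySem.Str.pyGet?_natCast]
  rw [PySem.List.foldl_count_if, countP_range_min]
  simp

-- A's loop step is exactly the unconditional dict "modify with default []"
theorem stepA_eq (word : String) (d : PySem.Dict Int (List String)) (w : String) :
    (let ws := word_simialr_score word w
     if !(d.contains ws) then d.insert ws [w]
     else d.modify ws [] (fun l => l ++ [w]))
      = d.modify (sim_alt word w) [] (fun l => l ++ [w]) := by
  rw [← sim_eq]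
  by_cases h : d.contains (word_simialr_score word w)
  · simp [h]
  · simp only [Bool.not_eq_true] at h
    simp [h, PySem.Dict.modify, PySem.Dict.getD_of_not_contains d [] h]

-- ===== VERDICT (by name: the statement is the Claim_ definition above) =====
theorem words_simmilar_score_spec : Claim_equal_words_simmilar_score := by
  intro word words _
  unfold Spec_words_simmilar_score words_simmilar_score words_simmilar_score_alt
  -- A's fold is the modify-fold over the (score, word) pairs
  have hA : (words.foldl (fun word_score Word =>
      let ws := word_simialr_score word Word
      if !(word_score.contains ws) then word_score.insert ws [Word]
      else word_score.modify ws [] (fun l => l ++ [Word]))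
      (PySem.Dict.empty : PySem.Dict Int (List String)))
      = ((words.map (fun w => (sim_alt word w, w))).foldl
          (fun d p => d.modify p.1 [] (fun l => l ++ [p.2]))
          (PySem.Dict.empty : PySem.Dict Int (List String))) := by
    rw [List.foldl_map]
    apply PySem.List.foldl_congr_mem
    intro d w _
    exact stepA_eq word d w
  rw [hA]
  set pairs := words.map (fun w => (sim_alt word w, w)) with hp
  set dA := pairs.foldl (fun d p => d.modify p.1 [] (fun l => l ++ [p.2]))
      (PySem.Dict.empty : PySem.Dict Int (List String)) with hdA
  -- A's dict, read out key by key
  have hnodup : dA.keys.Nodup := by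
    rw [hdA]
    exact PySem.Dict.nodup_keys_foldl_modify_key pairs (fun p => p.1) [] (fun _ p _ => _ ++ [p.2]) _ PySem.Dict.nodup_keys_empty
  have hkeys : dA.keys = PySem.List.dedup (pairs.map (fun p => p.1)) := by
    rw [hdA]
    have := PySem.Dict.keys_foldl_modify_key (f := fun _ p l => l ++ [p.2]) pairs (fun p => p.1) [] (PySem.Dict.empty : PySem.Dict Int (List String))
    simpa [PySem.Dict.keys, PySem.Set.update_nil_left] using this
  have hgetD : ∀ s, dA.getD s [] = (pairs.filter (fun p => p.1 == s)).map (fun p => p.2) := by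
    intro s
    rw [hdA, PySem.Dict.getD_foldl_modify_append]
    simp
  rw [PySem.Dict.items_eq_map_keys dA hnodup [], hkeys]
  -- B's dict: inserts fresh distinct keys into the empty dict
  rw [PySem.Dict.items_foldl_insert_fresh _ (fun s => s) _ _ (by intro a _; exact PySem.Dict.contains_empty _) (by simp)]
  rw [show (PySem.Dict.empty : PySem.Dict Int (List String)).items = [] from rfl, List.nil_append]
  apply List.map_congr_left
  intro s _
  rw [hgetD s]
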